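-- pv_equiv track=rewrite | github.com/hisaomlab/Murase_PolyX | fig6/makino/polyX_analyzer.py | analyze_polyx
-- ===== SOURCE A (Python) =====
-- from collections import defaultdict
--
-- AA_LIST = "ACDEFGHIKLMNPQRSTVWY"
--
-- def analyze_polyx(seqs, threshold):
--     max_len = {aa: 0 for aa in AA_LIST}
--     hits = defaultdict(list)
--
--     for gid, seq in seqs.items():
--         prev, run = None, 0
--         for aa in seq:
--             if aa == prev:
--                 run += 1
--             else:
--                 if prev in max_len:
--                     if run > max_len[prev]:
--                         max_len[prev] = run
--                     if run >= threshold: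
--                         hits[prev].append((gid, run))
--                 prev, run = aa, 1
--         if prev in max_len:
--             if run > max_len[prev]:
--                 max_len[prev] = run
--             if run >= threshold:
--                 hits[prev].append((gid, run))
--
--     return max_len, hits
-- ===== SOURCE B (Python) =====
-- from collections import defaultdict
--
-- AA_LIST = "ACDEFGHIKLMNPQRSTVWY"
--
-- def _runs(seq):
--     # run-length encode seq with a two-pointer index scan: [(char, run_length), ...]
--     out = []
--     i, n = 0, len(seq)
--     while i < n:
--         j = i + 1
--         while j < n and seq[j] == seq[i]:
--             j += 1
--         out.append((seq[i], j - i))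
--         i = j
--     return out
--
-- def analyze_polyx(seqs, threshold):
--     max_len = dict.fromkeys(AA_LIST, 0)
--     hits = defaultdict(list)
--     for gid, seq in seqs.items():
--         for aa, run in _runs(seq):
--             if aa in max_len:
--                 if run > max_len[aa]:
--                     max_len[aa] = run
--                 if run >= threshold:
--                     hits[aa].append((gid, run))
--     return max_len, hits
-- ===== Notes on version B (the rewrite author's own statement) =====
-- stated objective: simpler
-- what changed: B first run-length encodes each sequence with a two-pointer scan and then applies one uniform per-run update, eliminating A's prev/run accumulator state and its duplicated end-of-loop tail flush.
import Mathlib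
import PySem

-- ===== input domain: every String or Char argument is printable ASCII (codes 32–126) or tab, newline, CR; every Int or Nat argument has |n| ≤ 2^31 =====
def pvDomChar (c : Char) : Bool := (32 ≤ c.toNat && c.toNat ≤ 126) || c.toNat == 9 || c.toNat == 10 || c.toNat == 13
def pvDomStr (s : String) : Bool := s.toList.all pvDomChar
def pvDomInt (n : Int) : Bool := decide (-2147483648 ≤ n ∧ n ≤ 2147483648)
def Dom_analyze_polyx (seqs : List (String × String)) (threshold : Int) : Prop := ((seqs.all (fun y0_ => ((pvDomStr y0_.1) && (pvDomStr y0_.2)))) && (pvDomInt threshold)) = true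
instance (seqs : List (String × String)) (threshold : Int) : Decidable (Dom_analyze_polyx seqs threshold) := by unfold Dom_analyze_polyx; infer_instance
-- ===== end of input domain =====

-- B replaces A's manual prev/run accumulator with its duplicated tail-flush by a
-- run-length encoding pass (_runs) followed by one uniform per-run update (objective: simpler).

-- ===== PORT A =====

-- the "if prev in max_len: …" block of A (shared by the run boundary and the tail flush)
def pvFlushA (threshold : Int) (gid : String)
    (st : PySem.Dict String Int × PySem.Dict String (List (String × Int)))
    (prev : Option Char) (run : Int) :
    PySem.Dict String Int × PySem.Dict String (List (String × Int)) :=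
  match prev with
  | none => st                                   -- None is never a key of max_len
  | some c =>
    match st.1.get? c.toString with              -- 'prev in max_len'
    | none => st
    | some m =>
      let maxd := if m < run then st.1.insert c.toString run else st.1
      let hits := if threshold ≤ run then
          st.2.insert c.toString ((st.2.getD c.toString []) ++ [(gid, run)])  -- defaultdict append
        else st.2
      (maxd, hits)

-- one iteration of A's inner 'for aa in seq' loop
def pvStepA (threshold : Int) (gid : String)
    (acc : (PySem.Dict String Int × PySem.Dict String (List (String × Int))) × Option Char × Int)
    (aa : Char) :
    (PySem.Dict String Int × PySem.Dict String (List (String × Int))) × Option Char × Int :=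
  if some aa = acc.2.1 then (acc.1, acc.2.1, acc.2.2 + 1)
  else (pvFlushA threshold gid acc.1 acc.2.1 acc.2.2, some aa, 1)

def analyze_polyx (seqs : List (String × String)) (threshold : Int) :
    (List (String × Int)) × (List (String × List (String × Int))) :=
  let max_len : PySem.Dict String Int :=
    "ACDEFGHIKLMNPQRSTVWY".toList.foldl (fun d c => d.insert c.toString 0) PySem.Dict.empty
  let res := seqs.foldl
    (fun st p =>
      let r := p.2.toList.foldl (pvStepA threshold p.1) (st, none, 0)
      pvFlushA threshold p.1 r.1 r.2.1 r.2.2)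
    (max_len, PySem.Dict.empty)
  (res.1.items, res.2.items)

-- ===== PORT B =====

-- _runs: two-pointer run-length encoding; the inner 'while seq[j] == seq[i]' is the
-- takeWhile prefix (exact: it counts the adjacent equal chars), the outer loop resumes at j (dropWhile)
def pvRuns (l : List Char) : List (Char × Int) :=
  match l with
  | [] => []
  | c :: cs =>
    (c, 1 + (cs.takeWhile (· == c)).length) :: pvRuns (cs.dropWhile (· == c))
termination_by l.length
decreasing_by simpa using Nat.lt_succ_of_le (cs.length_dropWhile_le (· == c))

-- B's per-run body: 'if aa in max_len: …'
def pvStepB (threshold : Int) (gid : String)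
    (st : PySem.Dict String Int × PySem.Dict String (List (String × Int)))
    (p : Char × Int) :
    PySem.Dict String Int × PySem.Dict String (List (String × Int)) :=
  match st.1.get? p.1.toString with
  | none => st
  | some m =>
    let maxd := if m < p.2 then st.1.insert p.1.toString p.2 else st.1
    let hits := if threshold ≤ p.2 then
        st.2.insert p.1.toString ((st.2.getD p.1.toString []) ++ [(gid, p.2)])
      else st.2
    (maxd, hits)

def analyze_polyx_alt (seqs : List (String × String)) (threshold : Int) :
    (List (String × Int)) × (List (String × List (String × Int))) :=
  let max_len : PySem.Dict String Int :=
    PySem.Dict.ofList ("ACDEFGHIKLMNPQRSTVWY".toList.map (fun c => (c.toString, (0 : Int))))  -- dict.fromkeys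
  let res := seqs.foldl
    (fun st p => (pvRuns p.2.toList).foldl (pvStepB threshold p.1) st)
    (max_len, PySem.Dict.empty)
  (res.1.items, res.2.items)

-- ===== PRECONDITION & SPEC =====
def Spec_analyze_polyx (seqs : List (String × String)) (threshold : Int) (out : (List (String × Int)) × (List (String × List (String × Int)))) : Prop := out = analyze_polyx_alt seqs threshold
instance (seqs : List (String × String)) (threshold : Int) (out : (List (String × Int)) × (List (String × List (String × Int)))) : Decidable (Spec_analyze_polyx seqs threshold out) := by unfold Spec_analyze_polyx; infer_instance

-- ===== CLAIM (what is proved, stated in full; the proofs are below) =====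
def Claim_equal_analyze_polyx : Prop := ∀ (seqs : List (String × String)) (threshold : Int), Dom_analyze_polyx seqs threshold → Spec_analyze_polyx seqs threshold (analyze_polyx seqs threshold)

-- ===== LEMMAS AND PROOFS =====

-- proof-only helper: A's tail flush applied to the scan state
def pvFinish (t : Int) (g : String)
    (x : (PySem.Dict String Int × PySem.Dict String (List (String × Int))) × Option Char × Int) :
    PySem.Dict String Int × PySem.Dict String (List (String × Int)) :=
  pvFlushA t g x.1 x.2.1 x.2.2

-- A's flush at a run boundary is exactly B's per-run step
theorem pvFlush_eq_step (t : Int) (g : String)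
    (st : PySem.Dict String Int × PySem.Dict String (List (String × Int))) (c : Char) (r : Int) :
    pvFlushA t g st (some c) r = pvStepB t g st (c, r) := rfl

-- the head of a dropWhile remainder fails the predicate
theorem pvHeadDrop (p : Char → Bool) (l : List Char) (d : Char) (ds : List Char)
    (h : l.dropWhile p = d :: ds) : p d = false := by
  have h2 : l.dropWhile p ≠ [] := by simp [h]
  have h3 := List.head_dropWhile_not p h2
  have h4 : (l.dropWhile p).head h2 = d := by simp [h]
  rwa [h4] at h3

-- absorbing a block of chars equal to the current prev only increments run
theorem pvStepA_absorb (t : Int) (g : String) (c : Char) :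
    ∀ (cs : List Char), (∀ x ∈ cs, x = c) →
      ∀ (st : PySem.Dict String Int × PySem.Dict String (List (String × Int))) (r : Int),
      cs.foldl (pvStepA t g) (st, some c, r) = (st, some c, r + cs.length) := by
  intro cs
  induction cs with
  | nil => intro _ st r; simp
  | cons x xs ih =>
    intro h st r
    have hx : x = c := h x (by simp)
    simp only [List.foldl_cons, pvStepA, hx, if_true]
    rw [ih (fun y hy => h y (by simp [hy])) st (r + 1)]
    simp only [List.length_cons, Prod.mk.injEq, true_and]
    push_cast
    ring_nf

-- the main per-sequence lemma: A's scan + tail flush = B's fold over the runs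
theorem pvScan_aux (t : Int) (g : String) :
    ∀ (n : Nat) (l : List Char), l.length ≤ n →
      ∀ (st : PySem.Dict String Int × PySem.Dict String (List (String × Int))),
      pvFinish t g (l.foldl (pvStepA t g) (st, none, 0)) = (pvRuns l).foldl (pvStepB t g) st := by
  intro n
  induction n with
  | zero =>
    intro l hl st
    have : l = [] := List.eq_nil_of_length_eq_zero (Nat.le_zero.mp hl)
    subst this
    simp [pvFinish, pvFlushA, pvRuns]
  | succ n ih =>
    intro l hl st
    match l with
    | [] => simp [pvFinish, pvFlushA, pvRuns]
    | c :: cs =>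
      have hstep1 : pvStepA t g (st, none, 0) c = (st, some c, 1) := by
        simp [pvStepA, pvFlushA]
      have hsplit : cs.takeWhile (· == c) ++ cs.dropWhile (· == c) = cs :=
        List.takeWhile_append_dropWhile
      have habs : (cs.takeWhile (· == c)).foldl (pvStepA t g) (st, some c, 1)
          = (st, some c, 1 + ((cs.takeWhile (· == c)).length : Int)) :=
        pvStepA_absorb t g c _
          (fun x hx => by simpa using List.mem_takeWhile_imp hx) st 1
      have hruns : pvRuns (c :: cs)
          = (c, 1 + ((cs.takeWhile (· == c)).length : Int)) :: pvRuns (cs.dropWhile (· == c)) := by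
        rw [pvRuns]
      rw [List.foldl_cons, hstep1, hruns, List.foldl_cons, ← pvFlush_eq_step]
      conv_lhs => rw [← hsplit, List.foldl_append, habs]
      cases hd : cs.dropWhile (· == c) with
      | nil =>
        simp [pvFinish, pvRuns]
      | cons d ds =>
        have hdc : (d == c) = false := pvHeadDrop _ cs d ds hd
        have hdc2 : ¬ (some d = some c) := by
          simp only [Option.some.injEq]
          intro h; rw [h] at hdc; simp at hdc
        have hlen : (d :: ds).length ≤ n := by
          have h1 : (cs.dropWhile (· == c)).length ≤ cs.length := cs.length_dropWhile_le _
          rw [hd] at h1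
          have : cs.length ≤ n := by simpa using Nat.succ_le_succ_iff.mp (by simpa using hl)
          simpa using le_trans h1 this
        have hstep2 : pvStepA t g (st, some c, 1 + ((cs.takeWhile (· == c)).length : Int)) d
            = (pvFlushA t g st (some c) (1 + ((cs.takeWhile (· == c)).length : Int)), some d, 1) := by
          simp [pvStepA, hdc2]
        have h5 := ih (d :: ds) hlen
          (pvFlushA t g st (some c) (1 + ((cs.takeWhile (· == c)).length : Int)))
        have hstep0 : pvStepA t g
            (pvFlushA t g st (some c) (1 + ((cs.takeWhile (· == c)).length : Int)), none, 0) d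
            = (pvFlushA t g st (some c) (1 + ((cs.takeWhile (· == c)).length : Int)), some d, 1) := by
          simp [pvStepA, pvFlushA]
        rw [List.foldl_cons, hstep0] at h5
        rw [List.foldl_cons, hstep2]
        exact h5

theorem pvScan_eq_runs (t : Int) (g : String) (l : List Char)
    (st : PySem.Dict String Int × PySem.Dict String (List (String × Int))) :
    pvFinish t g (l.foldl (pvStepA t g) (st, none, 0)) = (pvRuns l).foldl (pvStepB t g) st :=
  pvScan_aux t g l.length l (le_refl _) st

set_option maxRecDepth 20000 in
theorem pvInit_eq :
    ("ACDEFGHIKLMNPQRSTVWY".toList.foldl (fun (d : PySem.Dict String Int) c => d.insert c.toString 0) PySem.Dict.empty)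
      = PySem.Dict.ofList ("ACDEFGHIKLMNPQRSTVWY".toList.map (fun c => (c.toString, (0 : Int)))) := by
  decide

-- ===== VERDICT (by name: the statement is the Claim_ definition above) =====
theorem analyze_polyx_spec : Claim_equal_analyze_polyx := by
  intro seqs threshold _
  have hfun : (fun (st : PySem.Dict String Int × PySem.Dict String (List (String × Int)))
        (p : String × String) =>
        let r := p.2.toList.foldl (pvStepA threshold p.1) (st, none, 0)
        pvFlushA threshold p.1 r.1 r.2.1 r.2.2)
      = (fun st p => (pvRuns p.2.toList).foldl (pvStepB threshold p.1) st) := by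
    funext st p
    exact pvScan_eq_runs threshold p.1 p.2.toList st
  simp only [Spec_analyze_polyx, analyze_polyx, analyze_polyx_alt, pvInit_eq, hfun]
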